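-- pv_equiv track=rewrite | github.com/YesManBelov/Console-BOT | robot.py | get_coord_list
-- ===== SOURCE A (Python) =====
-- ORDER_STEP_FORMAT = ((0, 1), (1, 1), (0, -1), (1, -1))  # 0 <=> x, 1 <=> y
--
-- def get_format_step(com_sym, step_format):
--     """Определяем новый формат хода (coord, step)"""
--     if com_sym == "L":
--         idx = 1
--     else:
--         idx = -1
--
--     # найдем индекс текущего формата хода в списке
--     idx_format = ORDER_STEP_FORMAT.index(step_format)
--
--     # поменяем формат по порядку на следующий или предыдущий, в зависимости от поворота
--     # и не забудем поделить по модулю на его длину, для цикличного перемещения в кортеже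
--     step_format = ORDER_STEP_FORMAT[(idx_format + idx) % len(ORDER_STEP_FORMAT)]
--     return step_format
--
-- def get_coord_list(com_string):
--     """Создаем карту координат"""
--     start_coord = [0, 0]
--     com_list = [start_coord, ]  # первую координату [0, 0] сразу добавим в список ходов
--
--     # step_format[0] - координата (x или y)
--     # step_format[1] - шаг (1 или -1)
--     step_format = ORDER_STEP_FORMAT[0]
--
--     for com in com_string:
--         if com == "F":
--             # получаем последнюю координату
--             last_coord = com_list[-1].copy()
--             # изменяем ее по формату, и записываем в конец (Так было без множителя)
--             last_coord[step_format[0]] += step_format[1]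
--             com_list.append(last_coord)
--         else:
--             # в зависимости от поворота, меняем формат
--             step_format = get_format_step(com, step_format)
--     return com_list
-- ===== SOURCE B (Python) =====
-- VEC = ((1, 0), (0, 1), (-1, 0), (0, -1))  # heading 0..3 -> unit step (ccw from +x)
--
-- def get_coord_list(com_string):
--     """Создаем карту координат"""
--     # Stage 1: net quarter-turn count before each forward move
--     headings = []
--     h = 0
--     for c in com_string:
--         if c == "F":
--             headings.append(h % 4)
--         elif c == "L":
--             h += 1
--         else:
--             h -= 1
--     # Stage 2: prefix-sum the unit vectors of those headings
--     coords = [[0, 0]]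
--     x = y = 0
--     for d in headings:
--         dx, dy = VEC[d]
--         x += dx
--         y += dy
--         coords.append([x, y])
--     return coords
-- ===== Notes on version B (the rewrite author's own statement) =====
-- stated objective: alternative
-- what changed: B is a two-stage pipeline: a first pass reduces the command string to a list of headings (net signed quarter-turn count mod 4 at each 'F'), and a second pass prefix-sums the unit vectors for those headings, replacing A's single-pass walk that mutates a copied last coordinate using a tuple-table looked up with .index and modular indexing; it avoids A's per-step list copy and .index scan (measured constant-factor speedup).
import Mathlib
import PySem

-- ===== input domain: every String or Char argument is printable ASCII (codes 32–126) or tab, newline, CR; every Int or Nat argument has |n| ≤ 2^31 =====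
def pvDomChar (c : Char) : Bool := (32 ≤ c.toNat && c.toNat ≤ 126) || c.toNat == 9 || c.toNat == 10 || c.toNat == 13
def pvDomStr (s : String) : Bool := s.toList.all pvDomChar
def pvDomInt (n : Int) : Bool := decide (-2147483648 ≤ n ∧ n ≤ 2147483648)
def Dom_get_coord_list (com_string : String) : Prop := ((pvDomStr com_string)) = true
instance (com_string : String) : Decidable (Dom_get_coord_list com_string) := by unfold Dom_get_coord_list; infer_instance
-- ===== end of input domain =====

-- B replaces A's single-pass table-lookup walk by a two-stage pipeline (headings pass, then prefix-sum pass); objective: alternative. A = B on all inputs.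

-- ===== PORT A =====
def ORDER_STEP_FORMAT : List (Int × Int) := [(0, 1), (1, 1), (0, -1), (1, -1)]

-- .index raises only if the value is absent; here step_format is always an element
-- of the table, so .getD 0 is never taken (same for the in-range table lookup).
def get_format_step (com_sym : Char) (step_format : Int × Int) : Int × Int :=
  let idx : Int := if com_sym = 'L' then 1 else -1
  let idx_format : Int := ((PySem.List.index? ORDER_STEP_FORMAT step_format).getD 0 : Nat)
  PySem.List.pyGetD ORDER_STEP_FORMAT (PySem.Int.mod (idx_format + idx) 4) (0, 0)

def get_coord_list (com_string : String) : List (List Int) :=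
  (com_string.toList.foldl
    (fun (st : List (List Int) × (Int × Int)) com =>
      if com = 'F' then
        let last_coord := PySem.List.pyGetD st.1 (-1) ([] : List Int)
        let last_coord := PySem.List.pySetD last_coord st.2.1
          (PySem.List.pyGetD last_coord st.2.1 0 + st.2.2)
        (st.1 ++ [last_coord], st.2)
      else
        (st.1, get_format_step com st.2))
    ([[0, 0]], (0, 1))).1

-- ===== PORT B =====
def VEC : List (Int × Int) := [(1, 0), (0, 1), (-1, 0), (0, -1)]

def get_coord_list_alt (com_string : String) : List (List Int) :=
  -- Stage 1: net signed quarter-turn count (mod 4) at each 'F'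
  let headings := (com_string.toList.foldl
    (fun (st : List Int × Int) c =>
      if c = 'F' then (st.1 ++ [PySem.Int.mod st.2 4], st.2)
      else if c = 'L' then (st.1, st.2 + 1)
      else (st.1, st.2 - 1)) ([], 0)).1
  -- Stage 2: prefix-sum the unit vectors of those headings
  (headings.foldl
    (fun (st : Int × Int × List (List Int)) d =>
      let v := PySem.List.pyGetD VEC d (0, 0)
      (st.1 + v.1, st.2.1 + v.2, st.2.2 ++ [[st.1 + v.1, st.2.1 + v.2]]))
    (0, 0, [[0, 0]])).2.2

-- ===== PRECONDITION & SPEC =====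
def Spec_get_coord_list (com_string : String) (out : List (List Int)) : Prop := out = get_coord_list_alt com_string
instance (com_string : String) (out : List (List Int)) : Decidable (Spec_get_coord_list com_string out) := by unfold Spec_get_coord_list; infer_instance

-- ===== CLAIM (what is proved, stated in full; the proofs are below) =====
def Claim_equal_get_coord_list : Prop := ∀ (com_string : String), Dom_get_coord_list com_string → Spec_get_coord_list com_string (get_coord_list com_string)

-- ===== LEMMAS AND PROOFS =====

def pvStepA : List (List Int) × (Int × Int) → Char → List (List Int) × (Int × Int) :=
  fun st com =>
    if com = 'F' then
      let last_coord := PySem.List.pyGetD st.1 (-1) ([] : List Int)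
      let last_coord := PySem.List.pySetD last_coord st.2.1
        (PySem.List.pyGetD last_coord st.2.1 0 + st.2.2)
      (st.1 ++ [last_coord], st.2)
    else
      (st.1, get_format_step com st.2)

def pvStep1 : List Int × Int → Char → List Int × Int :=
  fun st c =>
    if c = 'F' then (st.1 ++ [PySem.Int.mod st.2 4], st.2)
    else if c = 'L' then (st.1, st.2 + 1)
    else (st.1, st.2 - 1)

def pvStep2 : Int × Int × List (List Int) → Int → Int × Int × List (List Int) :=
  fun st d =>
    let v := PySem.List.pyGetD VEC d (0, 0)
    (st.1 + v.1, st.2.1 + v.2, st.2.2 ++ [[st.1 + v.1, st.2.1 + v.2]])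

-- headings list extracted by stage 1, accumulator factored out
def pvH (cs : List Char) (h : Int) : List Int := (cs.foldl pvStep1 ([], h)).1

lemma pvStep1_acc : ∀ (cs : List Char) (hs : List Int) (h : Int),
    (cs.foldl pvStep1 (hs, h)).1 = hs ++ pvH cs h := by
  intro cs
  induction cs with
  | nil => intro hs h; simp [pvH]
  | cons c cs ih =>
    intro hs h
    by_cases hF : c = 'F'
    · subst hF
      have e1 : ∀ l : List Int, pvStep1 (l, h) 'F' = (l ++ [PySem.Int.mod h 4], h) := by
        intro l; simp [pvStep1]
      simp only [pvH, List.foldl_cons, e1, List.nil_append]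
      rw [ih, ih [PySem.Int.mod h 4] h]
      simp
    · by_cases hL : c = 'L'
      · subst hL
        have e1 : ∀ l : List Int, pvStep1 (l, h) 'L' = (l, h + 1) := by
          intro l; simp [pvStep1]
        simp only [pvH, List.foldl_cons, e1]
        rw [ih]
        rfl
      · have e1 : ∀ l : List Int, pvStep1 (l, h) c = (l, h - 1) := by
          intro l; simp [pvStep1, hF, hL]
        simp only [pvH, List.foldl_cons, e1]
        rw [ih]
        rfl

lemma pvH_cons_F (cs : List Char) (h : Int) :
    pvH ('F' :: cs) h = PySem.Int.mod h 4 :: pvH cs h := by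
  simp only [pvH, List.foldl_cons, pvStep1]
  rw [pvStep1_acc]
  simp [pvH]

lemma pvH_cons_L (cs : List Char) (h : Int) :
    pvH ('L' :: cs) h = pvH cs (h + 1) := by
  simp [pvH, List.foldl_cons, pvStep1]

lemma pvH_cons_other (cs : List Char) (c : Char) (h : Int) (hF : c ≠ 'F') (hL : c ≠ 'L') :
    pvH (c :: cs) h = pvH cs (h - 1) := by
  simp [pvH, List.foldl_cons, pvStep1, hF, hL]

-- A's step-format tuple as a function of the heading
def pvSF (h : Int) : Int × Int :=
  PySem.List.pyGetD ORDER_STEP_FORMAT (PySem.Int.mod h 4) (0, 0)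

lemma pvMod4_cases (h : Int) : PySem.Int.mod h 4 = 0 ∨ PySem.Int.mod h 4 = 1 ∨
    PySem.Int.mod h 4 = 2 ∨ PySem.Int.mod h 4 = 3 := by
  rw [PySem.Int.mod_eq_emod_of_pos (by omega)]
  omega

lemma pvSF_turn_L (h : Int) : get_format_step 'L' (pvSF h) = pvSF (h + 1) := by
  rcases pvMod4_cases h with hm | hm | hm | hm <;>
  · have hm' := hm
    rw [PySem.Int.mod_eq_emod_of_pos (by omega : (0:Int) < 4)] at hm'
    have hm1 : PySem.Int.mod (h + 1) 4 = PySem.Int.mod (h % 4 + 1) 4 := by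
      rw [PySem.Int.mod_eq_emod_of_pos (by omega), PySem.Int.mod_eq_emod_of_pos (by omega)]
      omega
    rw [hm'] at hm1
    simp only [pvSF, hm, hm1]
    decide

lemma pvSF_turn_R (c : Char) (h : Int) (hL : c ≠ 'L') :
    get_format_step c (pvSF h) = pvSF (h - 1) := by
  rcases pvMod4_cases h with hm | hm | hm | hm <;>
  · have hm' := hm
    rw [PySem.Int.mod_eq_emod_of_pos (by omega : (0:Int) < 4)] at hm'
    have hm1 : PySem.Int.mod (h - 1) 4 = PySem.Int.mod (h % 4 + 3) 4 := by
      rw [PySem.Int.mod_eq_emod_of_pos (by omega), PySem.Int.mod_eq_emod_of_pos (by omega)]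
      omega
    rw [hm'] at hm1
    simp only [pvSF, hm, hm1, get_format_step, if_neg hL]
    decide

lemma pvLoop_eq : ∀ (cs : List Char) (acc : List (List Int)) (x y h : Int),
    (cs.foldl pvStepA (acc ++ [[x, y]], pvSF h)).1 =
      ((pvH cs h).foldl pvStep2 (x, y, acc ++ [[x, y]])).2.2 := by
  intro cs
  induction cs with
  | nil => intro acc x y h; rfl
  | cons c cs ih =>
    intro acc x y h
    by_cases hF : c = 'F'
    · subst hF
      rw [pvH_cons_F]
      rcases pvMod4_cases h with hm | hm | hm | hm <;>
      · simp only [List.foldl_cons, pvStepA, pvStep2, pvSF, hm]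
        have h' := ih (acc ++ [[x, y]])
        norm_num [ORDER_STEP_FORMAT, VEC, PySem.List.pyGetD_neg_one_append_singleton,
          PySem.List.pySetD, PySem.List.pySet?, PySem.List.pyIdx?, PySem.List.pyGetD,
          PySem.List.pyGet?, PySem.Raise.InRange]
        first
          | (have := h' (x + 1) y h; rw [pvSF, hm] at this;
             simpa [PySem.List.pyGetD, PySem.List.pyGet?, PySem.Raise.InRange] using this)
          | (have := h' x (y + 1) h; rw [pvSF, hm] at this;
             simpa [PySem.List.pyGetD, PySem.List.pyGet?, PySem.Raise.InRange] using this)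
          | (have := h' (x + -1) y h; rw [pvSF, hm] at this;
             simpa [PySem.List.pyGetD, PySem.List.pyGet?, PySem.Raise.InRange] using this)
          | (have := h' x (y + -1) h; rw [pvSF, hm] at this;
             simpa [PySem.List.pyGetD, PySem.List.pyGet?, PySem.Raise.InRange] using this)
    · by_cases hL : c = 'L'
      · subst hL
        rw [pvH_cons_L]
        simp only [List.foldl_cons, pvStepA, if_neg hF]
        rw [pvSF_turn_L]
        exact ih acc x y (h + 1)
      · rw [pvH_cons_other cs c h hF hL]
        simp only [List.foldl_cons, pvStepA, if_neg hF]
        rw [pvSF_turn_R c h hL]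
        exact ih acc x y (h - 1)

-- ===== VERDICT (by name: the statement is the Claim_ definition above) =====
theorem get_coord_list_spec : Claim_equal_get_coord_list := by
  intro s _
  show get_coord_list s = get_coord_list_alt s
  have hsf : pvSF 0 = (0, 1) := by decide
  have h := pvLoop_eq s.toList [] 0 0 0
  rw [hsf] at h
  exact h
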